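-- pv_equiv track=rewrite | github.com/Snarklll/Programacion | Ejercicio19 PE.py | burbuja_indirecta
-- ===== SOURCE A (Python) =====
-- def burbuja_indirecta(lista):
--     indices = list(range(len(lista)))
--     n = len(indices)
--
--     for i in range(n):
--         for j in range(0, n - i - 1):
--             if lista[indices[j + 1]] < lista[indices[j]]:
--                 indices[j], indices[j + 1] = indices[j + 1], indices[j]
--
--     return indices
-- ===== SOURCE B (Python) =====
-- def burbuja_indirecta(lista):
--     # Stable indirect merge sort: ties merge toward the left half,
--     # so the resulting permutation matches the stable bubble sort.
--     def merge(left, right):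
--         out = []
--         i = j = 0
--         while i < len(left) and j < len(right):
--             if lista[right[j]] < lista[left[i]]:
--                 out.append(right[j]); j += 1
--             else:
--                 out.append(left[i]); i += 1
--         out.extend(left[i:])
--         out.extend(right[j:])
--         return out
--
--     def msort(idx):
--         if len(idx) <= 1:
--             return idx
--         m = len(idx) // 2
--         return merge(msort(idx[:m]), msort(idx[m:]))
--
--     return msort(list(range(len(lista))))
-- ===== Notes on version B (the rewrite author's own statement) =====
-- stated objective: faster
-- what changed: Replaced the quadratic index bubble sort by a stable top-down merge sort on the index list (ties merge toward the left half).
import Mathlib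
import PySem

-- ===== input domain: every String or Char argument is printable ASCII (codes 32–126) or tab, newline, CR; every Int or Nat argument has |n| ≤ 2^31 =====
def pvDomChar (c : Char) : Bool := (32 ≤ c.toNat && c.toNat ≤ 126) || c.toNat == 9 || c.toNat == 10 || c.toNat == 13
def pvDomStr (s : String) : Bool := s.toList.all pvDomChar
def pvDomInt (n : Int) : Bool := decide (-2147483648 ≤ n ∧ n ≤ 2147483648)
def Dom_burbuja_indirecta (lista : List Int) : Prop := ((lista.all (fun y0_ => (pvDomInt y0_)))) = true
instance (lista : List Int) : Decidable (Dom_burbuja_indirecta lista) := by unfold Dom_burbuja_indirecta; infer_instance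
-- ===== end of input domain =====

-- B replaces A's quadratic index bubble sort by a stable top-down merge sort on the index list (faster).


-- ===== PORT A =====
-- `lista[indices[j]]` / `lista[indices[j+1]]`: every index read is in range by construction
-- (indices is a permutation of range(len(lista)), j+1 ≤ n-i-1 ≤ n-1), so getD is exact here.
def burbuja_indirecta (lista : List Int) : List Int :=
  let indices := (List.range lista.length).map Int.ofNat
  let n := indices.length
  (List.range n).foldl (fun ind i =>
    (List.range (n - i - 1)).foldl (fun ind j =>
      let a := ind.getD j 0
      let b := ind.getD (j + 1) 0
      if lista.getD b.toNat 0 < lista.getD a.toNat 0 then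
        (ind.set j b).set (j + 1) a
      else ind) ind) indices

-- ===== PORT B =====
-- merge(left, right) of Source B: the while loop over pointers i, j becomes recursion on the
-- two remaining suffixes; the trailing extends are the base cases.
def pvMerge (lista : List Int) : List Int → List Int → List Int
  | [], r => r
  | l, [] => l
  | a :: l, b :: r =>
    if lista.getD b.toNat 0 < lista.getD a.toNat 0 then
      b :: pvMerge lista (a :: l) r
    else
      a :: pvMerge lista l (b :: r)
termination_by l r => l.length + r.length

-- msort(idx) of Source B: split at len//2, sort halves, merge.
def pvMsort (lista : List Int) (idx : List Int) : List Int :=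
  if h : idx.length ≤ 1 then idx
  else
    let m := idx.length / 2
    pvMerge lista (pvMsort lista (idx.take m)) (pvMsort lista (idx.drop m))
termination_by idx.length
decreasing_by
  · simp only [List.length_take]; omega
  · simp only [List.length_drop]; omega

def burbuja_indirecta_alt (lista : List Int) : List Int :=
  pvMsort lista ((List.range lista.length).map Int.ofNat)

-- ===== PRECONDITION & SPEC =====
def Spec_burbuja_indirecta (lista : List Int) (out : List Int) : Prop := out = burbuja_indirecta_alt lista
instance (lista : List Int) (out : List Int) : Decidable (Spec_burbuja_indirecta lista out) := by unfold Spec_burbuja_indirecta; infer_instance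

-- ===== CLAIM (what is proved, stated in full; the proofs are below) =====
def Claim_equal_burbuja_indirecta : Prop := ∀ (lista : List Int), Dom_burbuja_indirecta lista → Spec_burbuja_indirecta lista (burbuja_indirecta lista)

-- ===== LEMMAS AND PROOFS =====
-- Both ports are characterised the same way: each returns a permutation of range(len(lista))
-- that is pairwise-sorted under the strict lexicographic order pvRel (key = lista[i], then
-- the index itself); such a list is unique, hence the two outputs are equal.
def pvKey (lista : List Int) (i : Int) : Int := lista.getD i.toNat 0

def pvRel (lista : List Int) (a b : Int) : Prop :=
  pvKey lista a < pvKey lista b ∨ (pvKey lista a = pvKey lista b ∧ a < b)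

lemma pvMerge_perm (lista : List Int) (l r : List Int) :
    (pvMerge lista l r).Perm (l ++ r) := by
  fun_induction pvMerge lista l r with
  | case1 r => simp
  | case2 l => simp
  | case3 a l b r hlt ih => exact (ih.cons b).trans List.perm_middle.symm
  | case4 a l b r hlt ih => simpa using ih.cons a

lemma pvMerge_pairwise (lista : List Int) (l r : List Int)
    (hl : l.Pairwise (pvRel lista)) (hr : r.Pairwise (pvRel lista))
    (hc : ∀ a ∈ l, ∀ b ∈ r, a < b) :
    (pvMerge lista l r).Pairwise (pvRel lista) := by
  fun_induction pvMerge lista l r with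
  | case1 r => exact hr
  | case2 l => exact hl
  | case3 a l b r hlt ih =>
      rcases List.pairwise_cons.1 hr with ⟨hbr, hr'⟩
      refine List.pairwise_cons.2 ⟨?_, ih hl hr' (fun x hx c hcin => hc x hx c (List.mem_cons_of_mem _ hcin))⟩
      intro w hw
      have hw' := (pvMerge_perm lista (a :: l) r).mem_iff.1 hw
      have hkba : pvKey lista b < pvKey lista a := hlt
      rcases (List.mem_append.1 hw') with h1 | h2
      · rcases List.mem_cons.1 h1 with rfl | hwl
        · exact Or.inl hkba
        · rcases List.pairwise_cons.1 hl with ⟨hal, _⟩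
          rcases hal w hwl with h | ⟨he, _⟩
          · exact Or.inl (lt_trans hkba h)
          · exact Or.inl (he ▸ hkba)
      · exact hbr w h2
  | case4 a l b r hlt ih =>
      rcases List.pairwise_cons.1 hl with ⟨hal, hl'⟩
      have hkab : pvKey lista a ≤ pvKey lista b := not_lt.1 hlt
      refine List.pairwise_cons.2 ⟨?_, ih hl' hr (fun x hx c hcin => hc x (List.mem_cons_of_mem _ hx) c hcin)⟩
      intro w hw
      have hw' := (pvMerge_perm lista l (b :: r)).mem_iff.1 hw
      rcases List.mem_append.1 hw' with h1 | h2
      · exact hal w h1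
      · rcases List.mem_cons.1 h2 with rfl | hwr
        · rcases lt_or_eq_of_le hkab with h | h
          · exact Or.inl h
          · exact Or.inr ⟨h, hc a (List.mem_cons_self) w List.mem_cons_self⟩
        · rcases List.pairwise_cons.1 hr with ⟨hbr, _⟩
          rcases hbr w hwr with h | ⟨he, hbw⟩
          · exact Or.inl (lt_of_le_of_lt hkab h)
          · rcases lt_or_eq_of_le hkab with h' | h'
            · exact Or.inl (he ▸ h')
            · exact Or.inr ⟨h'.trans he, lt_trans (hc a List.mem_cons_self b List.mem_cons_self) hbw⟩

lemma pvMsort_perm (lista : List Int) (idx : List Int) :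
    (pvMsort lista idx).Perm idx := by
  fun_induction pvMsort lista idx with
  | case1 idx h => exact List.Perm.refl idx
  | case2 idx h m ih1 ih2 =>
      exact ((pvMerge_perm lista _ _).trans ((ih1.append ih2).trans (by rw [List.take_append_drop]))) 

lemma pvMsort_pairwise (lista : List Int) (idx : List Int)
    (h : idx.Pairwise (· < ·)) :
    (pvMsort lista idx).Pairwise (pvRel lista) := by
  fun_induction pvMsort lista idx with
  | case1 idx hle =>
      match idx, hle with
      | [], _ => exact List.Pairwise.nil
      | [x], _ => exact List.pairwise_singleton _ _
  | case2 idx hle m ih1 ih2 =>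
      have hsplit : idx = idx.take (idx.length / 2) ++ idx.drop (idx.length / 2) := (List.take_append_drop _ _).symm
      have hp : (idx.take (idx.length / 2) ++ idx.drop (idx.length / 2)).Pairwise (· < ·) := hsplit ▸ h
      rcases List.pairwise_append.1 hp with ⟨h1, h2, hc⟩
      refine pvMerge_pairwise lista _ _ (ih1 h1) (ih2 h2) ?_
      intro a ha b hb
      exact hc a ((pvMsort_perm lista _).mem_iff.1 ha) b ((pvMsort_perm lista _).mem_iff.1 hb)

def pvStab (lista : List Int) (l : List Int) : Prop :=
  l.Pairwise (fun a b => pvKey lista a = pvKey lista b → a < b)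

def pvPass (lista : List Int) : Nat → List Int → List Int
  | 0, l => l
  | m + 1, x :: y :: t =>
      if lista.getD y.toNat 0 < lista.getD x.toNat 0 then
        y :: pvPass lista m (x :: t)
      else
        x :: pvPass lista m (y :: t)
  | _ + 1, l => l

lemma pvPass_perm (lista : List Int) (m : Nat) (l : List Int) :
    (pvPass lista m l).Perm l := by
  fun_induction pvPass lista m l with
  | case1 l => exact List.Perm.refl l
  | case2 m x y t hlt ih => exact (ih.cons y).trans (List.Perm.swap x y t)
  | case3 m x y t hlt ih => exact ih.cons x
  | case4 m l h => exact List.Perm.refl l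

lemma pvPass_length (lista : List Int) (m : Nat) (l : List Int) :
    (pvPass lista m l).length = l.length := (pvPass_perm lista m l).length_eq

lemma pvPass_append (lista : List Int) (m : Nat) (l s : List Int)
    (h : m + 1 ≤ l.length) :
    pvPass lista m (l ++ s) = pvPass lista m l ++ s := by
  induction m generalizing l with
  | zero => simp [pvPass]
  | succ m ih =>
      match l, h with
      | x :: y :: t, h2 =>
          simp only [List.cons_append, pvPass]
          split
          · rw [show x :: (t ++ s) = (x :: t) ++ s from rfl, ih (x :: t) (by simp at h2 ⊢; omega)]; simp
          · rw [show y :: (t ++ s) = (y :: t) ++ s from rfl, ih (y :: t) (by simp at h2 ⊢; omega)]; simp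
      | [x], hx => simp at hx
      | [], hx => simp at hx

lemma pvPass_max (lista : List Int) (m : Nat) (l : List Int)
    (hst : pvStab lista l) (hlen : l.length = m + 1) :
    ∃ l' z, pvPass lista m l = l' ++ [z] ∧ (∀ w ∈ l', pvRel lista w z) ∧
      pvStab lista (l' ++ [z]) ∧ (l' ++ [z]).Perm l := by
  induction m generalizing l with
  | zero =>
      match l, hlen with
      | [x], _ => exact ⟨[], x, rfl, by simp, by simp [pvStab], List.Perm.refl _⟩
  | succ m ih =>
      match l, hlen with
      | x :: y :: t, hlen =>
        rcases List.pairwise_cons.1 hst with ⟨hx, hst'⟩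
        rcases List.pairwise_cons.1 hst' with ⟨hy, hstt⟩
        by_cases hlt : lista.getD y.toNat 0 < lista.getD x.toNat 0
        · -- swap: y goes to front, recurse on x :: t
          have hkyx : pvKey lista y < pvKey lista x := hlt
          have hstxt : pvStab lista (x :: t) :=
            List.pairwise_cons.2 ⟨fun w hw => hx w (List.mem_cons_of_mem _ hw), hstt⟩
          rcases ih (x :: t) hstxt (by simpa using Nat.succ_injective hlen) with
            ⟨l', z, heq, hmax, hstab', hperm⟩
          have hzmem : z ∈ x :: t := hperm.mem_iff.1 (by simp)
          have hkxz : pvKey lista x ≤ pvKey lista z := by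
            rcases List.mem_cons.1 hzmem with rfl | hzt
            · exact le_refl _
            · rcases List.mem_append.1 (hperm.symm.mem_iff.1 List.mem_cons_self) with h | h
              · rcases hmax x h with h' | ⟨he, _⟩
                · exact le_of_lt h'
                · exact le_of_eq he
              · simp at h; exact h ▸ le_refl _
          refine ⟨y :: l', z, ?_, ?_, ?_, ?_⟩
          · simp only [pvPass, if_pos hlt, heq, List.cons_append]
          · intro w hw
            rcases List.mem_cons.1 hw with rfl | hwl
            · exact Or.inl (lt_of_lt_of_le hkyx hkxz)
            · exact hmax w hwl
          · refine List.pairwise_cons.2 ⟨?_, hstab'⟩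
            intro w hw hke
            have hwmem : w ∈ x :: t := hperm.mem_iff.1 hw
            rcases List.mem_cons.1 hwmem with rfl | hwt
            · exact absurd hke (ne_of_lt hkyx)
            · exact hy w hwt hke
          · exact ((hperm.cons y).trans (List.Perm.swap x y t)).symm.symm
        · -- no swap: x stays, recurse on y :: t
          have hkxy : pvKey lista x ≤ pvKey lista y := not_lt.1 hlt
          rcases ih (y :: t) hst' (by simpa using Nat.succ_injective hlen) with
            ⟨l', z, heq, hmax, hstab', hperm⟩
          have hzmem : z ∈ y :: t := hperm.mem_iff.1 (by simp)
          have hrxz : pvRel lista x z := by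
            rcases List.mem_cons.1 hzmem with rfl | hzt
            · rcases lt_or_eq_of_le hkxy with h | h
              · exact Or.inl h
              · exact Or.inr ⟨h, hx z List.mem_cons_self h⟩
            · have hkyz : pvKey lista y ≤ pvKey lista z := by
                rcases List.mem_append.1 (hperm.symm.mem_iff.1 (List.mem_cons_self : y ∈ y :: t)) with h | h
                · rcases hmax y h with h' | ⟨he, _⟩
                  · exact le_of_lt h'
                  · exact le_of_eq he
                · simp at h; exact h ▸ le_refl _
              rcases lt_or_eq_of_le (le_trans hkxy hkyz) with h | h
              · exact Or.inl h
              · refine Or.inr ⟨h, hx z (List.mem_cons_of_mem _ hzt) h⟩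
          refine ⟨x :: l', z, ?_, ?_, ?_, ?_⟩
          · simp only [pvPass, if_neg hlt, heq, List.cons_append]
          · intro w hw
            rcases List.mem_cons.1 hw with rfl | hwl
            · exact hrxz
            · exact hmax w hwl
          · refine List.pairwise_cons.2 ⟨?_, hstab'⟩
            intro w hw hke
            have hwmem : w ∈ y :: t := hperm.mem_iff.1 hw
            exact hx w hwmem hke
          · exact hperm.cons x

def pvStep (lista : List Int) (ind : List Int) (j : Nat) : List Int :=
  let a := ind.getD j 0
  let b := ind.getD (j + 1) 0
  if lista.getD b.toNat 0 < lista.getD a.toNat 0 then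
    (ind.set j b).set (j + 1) a
  else ind

lemma pvStep_shift (lista : List Int) (h : Int) (t : List Int) (j : Nat) :
    pvStep lista (h :: t) (j + 1) = h :: pvStep lista t j := by
  simp only [pvStep, List.getD_cons_succ, List.set_cons_succ]
  split <;> rfl

lemma pvFoldShift (lista : List Int) (L : List Nat) :
    ∀ (h : Int) (t : List Int),
      L.foldl (fun st j => pvStep lista st (j + 1)) (h :: t) =
        h :: L.foldl (pvStep lista) t := by
  induction L with
  | nil => intro h t; rfl
  | cons j L ih =>
      intro h t
      simp only [List.foldl_cons, pvStep_shift]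
      exact ih h _

lemma pvFoldPass (lista : List Int) (m : Nat) (l : List Int) (hm : m < l.length) :
    (List.range m).foldl (pvStep lista) l = pvPass lista m l := by
  induction m generalizing l with
  | zero => rfl
  | succ m ih =>
      match l, hm with
      | x :: y :: t, hm =>
        rw [List.range_succ_eq_map]
        simp only [List.foldl_cons, List.foldl_map]
        have hstep0 : pvStep lista (x :: y :: t) 0 =
            if lista.getD y.toNat 0 < lista.getD x.toNat 0 then y :: x :: t else x :: y :: t := by
          simp only [pvStep, List.getD_cons_zero, List.getD_cons_succ]
          split <;> rfl
        rw [hstep0]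
        by_cases hlt : lista.getD y.toNat 0 < lista.getD x.toNat 0
        · rw [if_pos hlt, pvFoldShift, ih (x :: t) (by simp at hm ⊢; omega)]
          simp only [pvPass, if_pos hlt]
        · rw [if_neg hlt, pvFoldShift, ih (y :: t) (by simp at hm ⊢; omega)]
          simp only [pvPass, if_neg hlt]
      | [x], hm => simp at hm
      | [], hm => simp at hm

def pvOuter (lista : List Int) (n : Nat) (l : List Int) : List Int :=
  (List.range n).foldl (fun st i => pvPass lista (n - i - 1) st) l

lemma pvAfold (lista : List Int) (n : Nat) (L : List Nat) :
    ∀ (l : List Int), l.length = n → (∀ i ∈ L, i < n) →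
      L.foldl (fun st i => (List.range (n - i - 1)).foldl (pvStep lista) st) l =
        L.foldl (fun st i => pvPass lista (n - i - 1) st) l := by
  induction L with
  | nil => intro l _ _; rfl
  | cons i L ih =>
      intro l hl hmem
      have hi : i < n := hmem i List.mem_cons_self
      simp only [List.foldl_cons]
      rw [pvFoldPass lista _ l (by omega)]
      exact ih _ (by rw [pvPass_length, hl]) (fun j hj => hmem j (List.mem_cons_of_mem _ hj))

lemma pvFoldPassAppend (lista : List Int) (F : Nat → Nat) (L : List Nat) :
    ∀ (l : List Int) (z : Int), (∀ j ∈ L, F j + 1 ≤ l.length) →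
      L.foldl (fun st j => pvPass lista (F j) st) (l ++ [z]) =
        L.foldl (fun st j => pvPass lista (F j) st) l ++ [z] := by
  induction L with
  | nil => intro l z _; rfl
  | cons j L ih =>
      intro l z hmem
      simp only [List.foldl_cons]
      rw [pvPass_append lista _ l [z] (hmem j List.mem_cons_self)]
      exact ih _ z (fun j' hj' => by
        rw [pvPass_length]; exact hmem j' (List.mem_cons_of_mem _ hj'))

lemma pvOuter_sorted (lista : List Int) :
    ∀ (n : Nat) (l : List Int), l.length = n → pvStab lista l →
      (pvOuter lista n l).Perm l ∧ (pvOuter lista n l).Pairwise (pvRel lista) := by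
  intro n
  induction n with
  | zero =>
      intro l hl _
      have : l = [] := List.length_eq_zero_iff.1 hl
      subst this
      exact ⟨List.Perm.refl _, List.Pairwise.nil⟩
  | succ n ih =>
      intro l hl hst
      rcases pvPass_max lista n l hst hl with ⟨l', z, heq, hmax, hstab', hperm⟩
      have hl' : l'.length = n := by
        have := hperm.length_eq
        simp at this; omega
      have hfold : pvOuter lista (n + 1) l = pvOuter lista n l' ++ [z] := by
        unfold pvOuter
        rw [List.range_succ_eq_map]
        simp only [List.foldl_cons, List.foldl_map]
        have h0 : n + 1 - 0 - 1 = n := by omega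
        rw [h0, heq]
        have hfeq : (fun (st : List Int) (j : Nat) => pvPass lista (n + 1 - (j + 1) - 1) st) =
            (fun (st : List Int) (j : Nat) => pvPass lista (n - j - 1) st) := by
          funext st j
          rw [show n + 1 - (j + 1) - 1 = n - j - 1 from by omega]
        rw [hfeq]
        exact pvFoldPassAppend lista (fun j => n - j - 1) (List.range n) l' z
          (fun j hj => by
            have hjn := List.mem_range.1 hj
            show n - j - 1 + 1 ≤ l'.length
            rw [hl']; omega)
      have hstl' : pvStab lista l' := (List.pairwise_append.1 hstab').1
      rcases ih l' hl' hstl' with ⟨hperm', hpair'⟩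
      constructor
      · rw [hfold]
        exact (hperm'.append (List.Perm.refl [z])).trans hperm
      · rw [hfold]
        refine List.pairwise_append.2 ⟨hpair', List.pairwise_singleton _ _, ?_⟩
        intro w hw z' hz'
        have : z' = z := by simpa using hz'
        subst this
        exact hmax w (hperm'.mem_iff.1 hw)

lemma pvIdx_pairwise (n : Nat) :
    ((List.range n).map Int.ofNat).Pairwise (· < ·) := by
  exact List.pairwise_lt_range.map Int.ofNat (fun a b h => Int.ofNat_lt.mpr h)

theorem pvFinal (lista : List Int) : burbuja_indirecta lista = burbuja_indirecta_alt lista := by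
  set idx0 : List Int := (List.range lista.length).map Int.ofNat with hidx0
  have hlen0 : idx0.length = lista.length := by simp [hidx0]
  have hpidx : idx0.Pairwise (· < ·) := pvIdx_pairwise lista.length
  have hA : burbuja_indirecta lista = pvOuter lista lista.length idx0 := by
    show (List.range idx0.length).foldl
        (fun ind i => (List.range (idx0.length - i - 1)).foldl (pvStep lista) ind) idx0 =
      pvOuter lista lista.length idx0
    rw [hlen0]
    exact pvAfold lista lista.length (List.range lista.length) idx0 hlen0
      (fun i hi => List.mem_range.1 hi)
  have hstab : pvStab lista idx0 := by
    refine hpidx.imp ?_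
    intro a b h _
    exact h
  rcases pvOuter_sorted lista lista.length idx0 hlen0 hstab with ⟨hpermA, hpairA⟩
  have hpermB : (burbuja_indirecta_alt lista).Perm idx0 := pvMsort_perm lista idx0
  have hpairB : (burbuja_indirecta_alt lista).Pairwise (pvRel lista) := pvMsort_pairwise lista idx0 hpidx
  have hanti : ∀ (a b : Int), a ∈ pvOuter lista lista.length idx0 → b ∈ burbuja_indirecta_alt lista →
      pvRel lista a b → pvRel lista b a → a = b := by
    intro a b _ _ h1 h2
    rcases h1 with h1 | ⟨e1, l1⟩ <;> rcases h2 with h2 | ⟨e2, l2⟩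
    · exact absurd h2 (lt_asymm h1)
    · exact absurd h1 (by rw [e2]; exact lt_irrefl _)
    · exact absurd h2 (by rw [e1]; exact lt_irrefl _)
    · exact absurd l2 (lt_asymm l1)
  rw [hA]
  exact List.Perm.eq_of_pairwise hanti hpairA hpairB (hpermA.trans hpermB.symm)

-- ===== VERDICT (by name: the statement is the Claim_ definition above) =====
theorem burbuja_indirecta_spec : Claim_equal_burbuja_indirecta := by
  intro lista _
  exact pvFinal lista
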